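-- pv_equiv track=rewrite | github.com/abbrubin150-ui/neuro-lingua | symmetry_coupling/core.py | lcs_length_fuzzy
-- ===== SOURCE A (Python) =====
-- from typing import Dict, Iterable, List, Mapping, Optional, Sequence, Tuple
--
-- def lcs_length_fuzzy(
--     seq_a: Sequence[str],
--     seq_b: Sequence[str],
--     canonical_map: Mapping[str, str],
--     max_edit_distance: int,
-- ) -> int:
--     """Compute an LCS length that tolerates synonyms and near matches."""
--
--     if not seq_a or not seq_b:
--         return 0
--
--     len_a, len_b = len(seq_a), len(seq_b)
--     dp = [[0] * (len_b + 1) for _ in range(len_a + 1)]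
--
--     for i in range(len_a):
--         for j in range(len_b):
--             if _tokens_equivalent(seq_a[i], seq_b[j], canonical_map, max_edit_distance):
--                 dp[i + 1][j + 1] = dp[i][j] + 1
--             else:
--                 dp[i + 1][j + 1] = max(dp[i][j + 1], dp[i + 1][j])
--     return dp[len_a][len_b]
--
-- def _tokens_equivalent(
--     token_a: str,
--     token_b: str,
--     canonical_map: Mapping[str, str],
--     max_edit_distance: int,
-- ) -> bool:
--     if token_a == token_b:
--         return True
--
--     if canonical_map:
--         if canonical_map.get(token_a, token_a) == canonical_map.get(token_b, token_b):
--             return True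
--
--     if max_edit_distance < 0:
--         return False
--
--     return _levenshtein_distance(token_a, token_b) <= max_edit_distance
--
-- def _levenshtein_distance(token_a: str, token_b: str) -> int:
--     """Compute the Levenshtein distance between two strings."""
--
--     if token_a == token_b:
--         return 0
--
--     if len(token_a) < len(token_b):
--         token_a, token_b = token_b, token_a
--
--     previous_row = list(range(len(token_b) + 1))
--     for i, char_a in enumerate(token_a, start=1):
--         current_row = [i]
--         for j, char_b in enumerate(token_b, start=1):
--             insert_cost = current_row[j - 1] + 1
--             delete_cost = previous_row[j] + 1
--             replace_cost = previous_row[j - 1] + (char_a != char_b)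
--             current_row.append(min(insert_cost, delete_cost, replace_cost))
--         previous_row = current_row
--     return previous_row[-1]
-- ===== SOURCE B (Python) =====
-- # Top-down memoized recursion over prefix lengths instead of A's bottom-up 2D table fill.
--
-- def lcs_length_fuzzy(seq_a, seq_b, canonical_map, max_edit_distance):
--     """Compute an LCS length that tolerates synonyms and near matches."""
--     if not seq_a or not seq_b:
--         return 0
--     memo = {}
--
--     def solve(i, j):
--         if i == 0 or j == 0:
--             return 0
--         key = (i, j)
--         if key in memo:
--             return memo[key]
--         if _tokens_equivalent(seq_a[i - 1], seq_b[j - 1], canonical_map, max_edit_distance):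
--             result = solve(i - 1, j - 1) + 1
--         else:
--             result = max(solve(i - 1, j), solve(i, j - 1))
--         memo[key] = result
--         return result
--
--     return solve(len(seq_a), len(seq_b))
--
--
-- def _tokens_equivalent(token_a, token_b, canonical_map, max_edit_distance):
--     if token_a == token_b:
--         return True
--     if canonical_map:
--         if canonical_map.get(token_a, token_a) == canonical_map.get(token_b, token_b):
--             return True
--     if max_edit_distance < 0:
--         return False
--     return _levenshtein_distance(token_a, token_b) <= max_edit_distance
--
--
-- def _levenshtein_distance(token_a, token_b):
--     if token_a == token_b:
--         return 0
--     if len(token_a) < len(token_b):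
--         token_a, token_b = token_b, token_a
--     previous_row = list(range(len(token_b) + 1))
--     for i, char_a in enumerate(token_a, start=1):
--         current_row = [i]
--         for j, char_b in enumerate(token_b, start=1):
--             insert_cost = current_row[j - 1] + 1
--             delete_cost = previous_row[j] + 1
--             replace_cost = previous_row[j - 1] + (char_a != char_b)
--             current_row.append(min(insert_cost, delete_cost, replace_cost))
--         previous_row = current_row
--     return previous_row[-1]
-- ===== Notes on version B (the rewrite author's own statement) =====
-- stated objective: faster
-- what changed: Replaces A's bottom-up nested-loop fill of the full (len_a+1)x(len_b+1) DP table with a top-down memoized recursion solve(i,j) over prefix lengths cached in a dict keyed by (i,j); only subproblems actually reachable from (len_a,len_b) are evaluated (a diagonal match skips a whole row and column of fuzzy comparisons), while _tokens_equivalent and _levenshtein_distance are kept unchanged.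
import Mathlib
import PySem

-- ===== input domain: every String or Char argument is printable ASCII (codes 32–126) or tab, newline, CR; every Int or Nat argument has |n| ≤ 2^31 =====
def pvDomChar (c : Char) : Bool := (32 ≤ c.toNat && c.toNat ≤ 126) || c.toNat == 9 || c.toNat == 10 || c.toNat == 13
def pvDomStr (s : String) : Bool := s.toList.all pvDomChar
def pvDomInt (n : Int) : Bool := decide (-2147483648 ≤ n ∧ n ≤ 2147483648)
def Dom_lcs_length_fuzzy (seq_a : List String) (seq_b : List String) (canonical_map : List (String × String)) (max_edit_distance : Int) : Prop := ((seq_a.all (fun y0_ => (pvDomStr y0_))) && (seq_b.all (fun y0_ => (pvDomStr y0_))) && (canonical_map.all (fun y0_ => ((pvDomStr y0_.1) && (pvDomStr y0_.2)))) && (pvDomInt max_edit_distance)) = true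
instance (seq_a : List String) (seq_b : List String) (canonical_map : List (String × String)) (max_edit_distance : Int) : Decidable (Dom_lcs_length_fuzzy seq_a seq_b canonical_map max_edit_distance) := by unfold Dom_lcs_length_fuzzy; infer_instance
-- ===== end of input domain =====

-- B replaces A's bottom-up 2D table fill with a top-down memoized recursion that evaluates only demand-reachable (i,j) subproblems (same result; measured faster in a timing run).

-- ===== PORT A =====
-- shared helper: _levenshtein_distance, inner loop (walks previous_row while appending to current_row)
def levInner (ca : Char) (pp last : Int) (prev : List Int) (tb : List Char) : List Int :=
  match prev, tb with
  | pj :: prev', cb :: tb' =>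
      -- min(insert_cost, delete_cost, replace_cost)
      let v := min (min (last + 1) (pj + 1)) (pp + (if ca == cb then 0 else 1))
      v :: levInner ca pj v prev' tb'
  | _, _ => []

-- shared helper: _levenshtein_distance, outer loop over token_a's characters (i = 1-based index)
def levOuter (tb : List Char) (prev : List Int) (i : Int) (ta : List Char) : List Int :=
  match ta with
  | [] => prev
  | ca :: ta' =>
      let cur := match prev with
        | p0 :: rest => (i + 1) :: levInner ca p0 (i + 1) rest tb
        | [] => [i + 1]  -- unreachable: previous_row always has length len(token_b)+1 ≥ 1
      levOuter tb cur (i + 1) ta'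

-- shared helper: _levenshtein_distance (kept unchanged by B, exactly as in the Python)
def levenshtein (a b : String) : Int :=
  if a == b then 0
  else
    let ta := if a.toList.length < b.toList.length then b.toList else a.toList
    let tb := if a.toList.length < b.toList.length then a.toList else b.toList
    let prev0 : List Int := (List.range (tb.length + 1)).map Int.ofNat  -- list(range(len(token_b)+1))
    (levOuter tb prev0 0 ta).getLastD 0  -- previous_row[-1]; the row is never empty

-- shared helper: _tokens_equivalent (kept unchanged by B)
def tokensEquiv (a b : String) (cm : List (String × String)) (med : Int) : Bool :=
  if a == b then true
  else if (!cm.isEmpty) &&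
          (PySem.Dict.getD (PySem.Dict.mk cm) a a == PySem.Dict.getD (PySem.Dict.mk cm) b b) then true
  else if med < 0 then false
  else decide (levenshtein a b ≤ med)

-- dp[i][j] read / dp[i][j] = v write; all indices used by port A are in range
def dpGet (dp : List (List Int)) (i j : Nat) : Int := (dp.getD i []).getD j 0
def dpSet (dp : List (List Int)) (i j : Nat) (v : Int) : List (List Int) :=
  dp.set i ((dp.getD i []).set j v)

def lcs_length_fuzzy (seq_a : List String) (seq_b : List String) (canonical_map : List (String × String)) (max_edit_distance : Int) : Int :=
  if seq_a.isEmpty || seq_b.isEmpty then 0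
  else
    let m := seq_a.length
    let n := seq_b.length
    let dp0 := List.replicate (m + 1) (List.replicate (n + 1) (0 : Int))
    let dp := (List.range m).foldl (fun dp i =>
      (List.range n).foldl (fun dp j =>
        if tokensEquiv (seq_a.getD i "") (seq_b.getD j "") canonical_map max_edit_distance then
          dpSet dp (i + 1) (j + 1) (dpGet dp i j + 1)
        else
          dpSet dp (i + 1) (j + 1) (max (dpGet dp i (j + 1)) (dpGet dp (i + 1) j))) dp) dp0
    dpGet dp m n

-- ===== PORT B =====
-- solve(i, j): memoized top-down recursion; the memo dict is threaded through (value, memo)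
def solveB (sa sb : List String) (cm : List (String × String)) (med : Int)
    (i j : Nat) (memo : PySem.Dict (Nat × Nat) Int) : Int × PySem.Dict (Nat × Nat) Int :=
  if i = 0 ∨ j = 0 then (0, memo)
  else
    match memo.get? (i, j) with
    | some v => (v, memo)  -- if key in memo: return memo[key]
    | none =>
      if tokensEquiv (sa.getD (i - 1) "") (sb.getD (j - 1) "") cm med then
        let r := solveB sa sb cm med (i - 1) (j - 1) memo
        (r.1 + 1, r.2.insert (i, j) (r.1 + 1))
      else
        let r1 := solveB sa sb cm med (i - 1) j memo
        let r2 := solveB sa sb cm med i (j - 1) r1.2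
        (max r1.1 r2.1, r2.2.insert (i, j) (max r1.1 r2.1))
  termination_by (i, j)
  decreasing_by all_goals omega

def lcs_length_fuzzy_alt (seq_a : List String) (seq_b : List String) (canonical_map : List (String × String)) (max_edit_distance : Int) : Int :=
  if seq_a.isEmpty || seq_b.isEmpty then 0
  else
    (solveB seq_a seq_b canonical_map max_edit_distance seq_a.length seq_b.length PySem.Dict.empty).1

-- ===== PRECONDITION & SPEC =====
def Spec_lcs_length_fuzzy (seq_a : List String) (seq_b : List String) (canonical_map : List (String × String)) (max_edit_distance : Int) (out : Int) : Prop := out = lcs_length_fuzzy_alt seq_a seq_b canonical_map max_edit_distance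
instance (seq_a : List String) (seq_b : List String) (canonical_map : List (String × String)) (max_edit_distance : Int) (out : Int) : Decidable (Spec_lcs_length_fuzzy seq_a seq_b canonical_map max_edit_distance out) := by unfold Spec_lcs_length_fuzzy; infer_instance

-- ===== CLAIM (what is proved, stated in full; the proofs are below) =====
def Claim_equal_lcs_length_fuzzy : Prop := ∀ (seq_a : List String) (seq_b : List String) (canonical_map : List (String × String)) (max_edit_distance : Int), Dom_lcs_length_fuzzy seq_a seq_b canonical_map max_edit_distance → Spec_lcs_length_fuzzy seq_a seq_b canonical_map max_edit_distance (lcs_length_fuzzy seq_a seq_b canonical_map max_edit_distance)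

-- ===== LEMMAS AND PROOFS =====

-- the mathematical LCS-of-prefixes value both ports compute: L i j = fuzzy LCS of (first i of sa, first j of sb)
def Lp (sa sb : List String) (cm : List (String × String)) (med : Int) : Nat → Nat → Int
  | 0, _ => 0
  | _ + 1, 0 => 0
  | i + 1, j + 1 =>
      if tokensEquiv (sa.getD i "") (sb.getD j "") cm med then Lp sa sb cm med i j + 1
      else max (Lp sa sb cm med i (j + 1)) (Lp sa sb cm med (i + 1) j)
  termination_by i j => (i, j)

theorem Lp_zero_right (sa sb : List String) (cm : List (String × String)) (med : Int) :
    ∀ i, Lp sa sb cm med i 0 = 0 := by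
  intro i; cases i <;> simp [Lp]

-- ----- B side: the memoized recursion computes Lp -----
def MemoOK (sa sb : List String) (cm : List (String × String)) (med : Int)
    (memo : PySem.Dict (Nat × Nat) Int) : Prop :=
  ∀ p v, memo.get? p = some v → v = Lp sa sb cm med p.1 p.2

theorem MemoOK_insert (sa sb : List String) (cm : List (String × String)) (med : Int)
    (memo : PySem.Dict (Nat × Nat) Int) (i j : Nat) (v : Int)
    (h : MemoOK sa sb cm med memo) (hv : v = Lp sa sb cm med i j) :
    MemoOK sa sb cm med (memo.insert (i, j) v) := by
  intro p w hw
  rw [PySem.Dict.get?_insert] at hw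
  by_cases hp : p = (i, j)
  · rw [if_pos hp] at hw
    cases hw; subst hp; exact hv
  · rw [if_neg hp] at hw
    exact h p w hw

theorem solveB_correct (sa sb : List String) (cm : List (String × String)) (med : Int) :
    ∀ (N i j : Nat) (memo : PySem.Dict (Nat × Nat) Int), i + j ≤ N →
      MemoOK sa sb cm med memo →
      (solveB sa sb cm med i j memo).1 = Lp sa sb cm med i j ∧
        MemoOK sa sb cm med (solveB sa sb cm med i j memo).2 := by
  intro N
  induction N with
  | zero =>
    intro i j memo hn hm
    have hi : i = 0 := by omega
    rw [solveB, if_pos (Or.inl hi)]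
    exact ⟨by rw [hi]; simp [Lp], hm⟩
  | succ N ih =>
    intro i j memo hn hm
    by_cases h0 : i = 0 ∨ j = 0
    · rw [solveB, if_pos h0]
      refine ⟨?_, hm⟩
      rcases h0 with h | h
      · rw [h]; simp [Lp]
      · rw [h, Lp_zero_right]
    · push_neg at h0
      obtain ⟨i', hi⟩ := Nat.exists_eq_succ_of_ne_zero h0.1
      obtain ⟨j', hj⟩ := Nat.exists_eq_succ_of_ne_zero h0.2
      subst hi; subst hj
      rw [solveB, if_neg (by push_neg; exact h0)]
      cases hg : memo.get? (i' + 1, j' + 1) with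
      | some v =>
        exact ⟨hm _ v hg, hm⟩
      | none =>
        by_cases he : tokensEquiv (sa.getD (i' + 1 - 1) "") (sb.getD (j' + 1 - 1) "") cm med
        · rw [if_pos he]
          have h1 := ih (i' + 1 - 1) (j' + 1 - 1) memo (by omega) hm
          simp only [Nat.add_sub_cancel, Nat.succ_sub_one] at h1 he ⊢
          refine ⟨?_, MemoOK_insert _ _ _ _ _ _ _ _ h1.2 ?_⟩
          · rw [h1.1, Lp, if_pos he]
          · rw [h1.1, Lp, if_pos he]
        · rw [if_neg he]
          have h1 := ih (i' + 1 - 1) (j' + 1) memo (by omega) hm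
          have h2 := ih (i' + 1) (j' + 1 - 1)
            (solveB sa sb cm med (i' + 1 - 1) (j' + 1) memo).2 (by omega) h1.2
          simp only [Nat.add_sub_cancel, Nat.succ_sub_one] at h1 h2 he ⊢
          refine ⟨?_, MemoOK_insert _ _ _ _ _ _ _ _ h2.2 ?_⟩
          · rw [h1.1, h2.1, Lp, if_neg he]
          · rw [h1.1, h2.1, Lp, if_neg he]

-- ----- A side: the table fold, row by row (rolling-row characterisation, then rows = Lp) -----
def nextRowGo (cm : List (String × String)) (med : Int) (a : String) (last diag : Int)
    (row : List Int) (bs : List String) : List Int :=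
  match row, bs with
  | rj :: row', b :: bs' =>
      let v := if tokensEquiv a b cm med then diag + 1 else max rj last
      v :: nextRowGo cm med a v rj row' bs'
  | _, _ => []

def nextRow (cm : List (String × String)) (med : Int) (row : List Int) (a : String)
    (bs : List String) : List Int :=
  match row with
  | r0 :: rest => 0 :: nextRowGo cm med a 0 r0 rest bs
  | [] => [0]  -- unreachable: row always has length len(seq_b)+1 ≥ 1

-- the row after consuming the first k tokens of seq_a
def rowAfter (cm : List (String × String)) (med : Int) (bs as : List String) : Nat → List Int
  | 0 => List.replicate (bs.length + 1) 0
  | k + 1 => nextRow cm med (rowAfter cm med bs as k) (as.getD k "") bs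

-- the full table A holds after k outer iterations: rows 0..k are the true rows, the rest still zero
def tableAt (cm : List (String × String)) (med : Int) (bs as : List String) (k : Nat) : List (List Int) :=
  (List.range (as.length + 1)).map
    (fun t => if t ≤ k then rowAfter cm med bs as t else List.replicate (bs.length + 1) 0)

theorem nextRowGo_length (cm : List (String × String)) (med : Int) (a : String) :
    ∀ (row : List Int) (bs : List String) (last diag : Int),
      (nextRowGo cm med a last diag row bs).length = min row.length bs.length := by
  intro row
  induction row with
  | nil => intro bs last diag; cases bs <;> simp [nextRowGo]
  | cons r row' ih =>
    intro bs last diag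
    cases bs with
    | nil => simp [nextRowGo]
    | cons b bs' => simp [nextRowGo, ih, Nat.succ_min_succ]

theorem rowAfter_length (cm : List (String × String)) (med : Int) (bs as : List String) :
    ∀ k, (rowAfter cm med bs as k).length = bs.length + 1 := by
  intro k
  induction k with
  | zero => simp [rowAfter]
  | succ k ih =>
    simp only [rowAfter]
    rcases h : rowAfter cm med bs as k with _ | ⟨r0, rest⟩
    · rw [h] at ih; simp at ih
    · rw [h] at ih
      have hr : rest.length = bs.length := by simpa using ih
      simp [nextRow, nextRowGo_length, hr]

theorem nextRowGo_getD (cm : List (String × String)) (med : Int) (a : String) :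
    ∀ (row : List Int) (bs : List String) (last diag : Int) (j : Nat),
      j < row.length → j < bs.length →
      (nextRowGo cm med a last diag row bs).getD j 0 =
        if tokensEquiv a (bs.getD j "") cm med then
          (if j = 0 then diag else row.getD (j - 1) 0) + 1
        else
          max (row.getD j 0)
            (if j = 0 then last else (nextRowGo cm med a last diag row bs).getD (j - 1) 0) := by
  intro row
  induction row with
  | nil => intro bs last diag j h1 h2; simp at h1
  | cons r row' ih =>
    intro bs last diag j h1 h2
    cases bs with
    | nil => simp at h2
    | cons b bs' =>
      cases j with
      | zero => simp [nextRowGo]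
      | succ j =>
        simp only [nextRowGo, List.getD_cons_succ]
        have := ih bs' (if tokensEquiv a b cm med then diag + 1 else max r last) r j
          (by simpa using h1) (by simpa using h2)
        rw [this]
        cases j with
        | zero => simp
        | succ j => simp

-- the value A's inner loop writes at column j+1 is element j of nextRowGo's output
theorem inner_value (cm : List (String × String)) (med : Int) (a : String) (bs : List String)
    (p0 : Int) (rest : List Int) (j : Nat) (hr : j < rest.length) (hb : j < bs.length) :
    (nextRowGo cm med a 0 p0 rest bs).getD j 0 =
      if tokensEquiv a (bs.getD j "") cm med then
        ((p0 :: rest).getD j 0) + 1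
      else
        max ((p0 :: rest).getD (j + 1) 0)
          ((0 :: nextRowGo cm med a 0 p0 rest bs).getD j 0) := by
  rw [nextRowGo_getD cm med a rest bs 0 p0 j hr hb]
  cases j with
  | zero => simp
  | succ j => simp

-- A's inner loop over j fills row i+1 with exactly the next rolling row, leaving all other rows alone
theorem inner_fold (cm : List (String × String)) (med : Int) (a : String) (bs : List String)
    (p0 : Int) (rest : List Int) (hrest : rest.length = bs.length) :
    ∀ (j : Nat), j ≤ bs.length → ∀ (dp : List (List Int)) (i : Nat),
      dp.getD i [] = p0 :: rest →
      dp.getD (i + 1) [] = List.replicate (bs.length + 1) 0 →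
      i + 1 < dp.length →
      (List.range j).foldl (fun dp j =>
        if tokensEquiv a (bs.getD j "") cm med then
          dpSet dp (i + 1) (j + 1) (dpGet dp i j + 1)
        else
          dpSet dp (i + 1) (j + 1) (max (dpGet dp i (j + 1)) (dpGet dp (i + 1) j))) dp
      = dp.set (i + 1)
          (((0 :: nextRowGo cm med a 0 p0 rest bs).take (j + 1)) ++
            List.replicate (bs.length - j) 0) := by
  intro j
  induction j with
  | zero =>
    intro _ dp i h1 h2 hlen
    have h2' : dp.getD (i+1) [] = dp[i+1] := List.getD_eq_getElem dp [] hlen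
    simp only [List.range_zero, List.foldl_nil, List.take_succ_cons, List.take_zero,
      Nat.sub_zero, List.singleton_append]
    rw [show (0 : Int) :: List.replicate bs.length 0 = List.replicate (bs.length + 1) 0 from rfl,
      ← h2, h2', List.set_getElem_self]
  | succ j ih =>
    intro hj dp i h1 h2 hlen
    have hjn : j < bs.length := hj
    set g := nextRowGo cm med a 0 p0 rest bs with hg
    have hglen : g.length = bs.length := by
      rw [hg, nextRowGo_length]; omega
    have hjg : j < g.length := by omega
    rw [List.range_succ, List.foldl_append, ih (by omega) dp i h1 h2 hlen]
    set Pj := (0 :: g).take (j + 1) with hPj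
    have hPlen : Pj.length = j + 1 := by
      simp [hPj]; omega
    set D := dp.set (i + 1) (Pj ++ List.replicate (bs.length - j) 0) with hD
    have hrowi : D.getD i [] = p0 :: rest := by
      rw [hD, ← h1]; simp [List.getD, List.getElem?_set_ne (by omega : i + 1 ≠ i)]
    have hrowi1 : D.getD (i + 1) [] = Pj ++ List.replicate (bs.length - j) 0 := by
      rw [hD]; simp [List.getD, hlen]
    have hAij : dpGet D i j = (p0 :: rest).getD j 0 := by
      simp only [dpGet, hrowi]
    have hAij1 : dpGet D i (j + 1) = rest.getD j 0 := by
      simp only [dpGet, hrowi, List.getD_cons_succ]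
    have hBij : dpGet D (i + 1) j = (0 :: g).getD j 0 := by
      simp only [dpGet, hrowi1]
      rw [List.getD_append _ _ 0 j (by omega), hPj]
      cases j with
      | zero => simp
      | succ t =>
        simp only [List.take_succ_cons, List.getD, List.getElem?_cons_succ]
        rw [List.getElem?_take_of_lt (by omega)]
    have hval : (if tokensEquiv a (bs.getD j "") cm med then dpGet D i j + 1
        else max (dpGet D i (j + 1)) (dpGet D (i + 1) j)) = g.getD j 0 := by
      rw [hAij, hAij1, hBij, hg, inner_value cm med a bs p0 rest j (by omega) hjn]
      simp
    have hset : ∀ v : Int, dpSet D (i + 1) (j + 1) v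
        = dp.set (i + 1) ((Pj ++ List.replicate (bs.length - j) 0).set (j + 1) v) := by
      intro v
      rw [dpSet, hrowi1, hD, List.set_set]
    have hrow : (Pj ++ List.replicate (bs.length - j) 0).set (j + 1) (g.getD j 0)
        = (0 :: g).take (j + 1 + 1) ++ List.replicate (bs.length - (j + 1)) 0 := by
      have e1 : (0 :: g).take (j + 1 + 1)
          = Pj ++ [(0 :: g)[j + 1]'(by simp; omega)] :=
        List.take_succ_eq_append_getElem (by simp; omega)
      have e2 : (0 :: g)[j + 1]'(by simp; omega) = g.getD j 0 := by
        simp only [List.getElem_cons_succ]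
        rw [List.getD_eq_getElem g 0 hjg]
      have e3 : List.replicate (bs.length - j) (0 : Int)
          = 0 :: List.replicate (bs.length - (j + 1)) 0 := by
        rw [show bs.length - j = (bs.length - (j + 1)) + 1 by omega]; rfl
      rw [e1, e2, e3, show j + 1 = Pj.length by omega,
        List.set_append_right _ _ (by omega)]
      simp
    simp only [List.foldl_cons, List.foldl_nil]
    split
    case isTrue h =>
      rw [hset, show dpGet D i j + 1 = g.getD j 0 by rw [← hval, if_pos h], hrow]
    case isFalse h =>
      rw [hset, show max (dpGet D i (j+1)) (dpGet D (i+1) j) = g.getD j 0 by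
        rw [← hval, if_neg h], hrow]

theorem tableAt_length (cm : List (String × String)) (med : Int) (bs as : List String) (k : Nat) :
    (tableAt cm med bs as k).length = as.length + 1 := by
  simp [tableAt]

theorem tableAt_getD (cm : List (String × String)) (med : Int) (bs as : List String)
    (k t : Nat) (ht : t < as.length + 1) :
    (tableAt cm med bs as k).getD t []
      = if t ≤ k then rowAfter cm med bs as t else List.replicate (bs.length + 1) 0 := by
  rw [List.getD_eq_getElem _ [] (by simpa [tableAt] using ht)]
  simp [tableAt]

theorem set_tableAt (cm : List (String × String)) (med : Int) (bs as : List String)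
    (k : Nat) (_hk : k < as.length) :
    (tableAt cm med bs as k).set (k + 1) (rowAfter cm med bs as (k + 1))
      = tableAt cm med bs as (k + 1) := by
  apply List.ext_getElem (by simp [tableAt])
  intro t h1 h2
  simp only [tableAt, List.getElem_map, List.getElem_range] at h2 ⊢
  rw [List.getElem_set]
  split
  case isTrue h => simp [← h]
  case isFalse h =>
    simp only [List.getElem_map, List.getElem_range]
    by_cases ht : t ≤ k
    · rw [if_pos ht, if_pos (by omega)]
    · rw [if_neg ht, if_neg (by omega)]

theorem outer_fold (cm : List (String × String)) (med : Int) (bs as : List String) :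
    ∀ k, k ≤ as.length →
      (List.range k).foldl (fun dp i =>
        (List.range bs.length).foldl (fun dp j =>
          if tokensEquiv (as.getD i "") (bs.getD j "") cm med then
            dpSet dp (i + 1) (j + 1) (dpGet dp i j + 1)
          else
            dpSet dp (i + 1) (j + 1) (max (dpGet dp i (j + 1)) (dpGet dp (i + 1) j))) dp)
        (List.replicate (as.length + 1) (List.replicate (bs.length + 1) 0))
      = tableAt cm med bs as k := by
  intro k
  induction k with
  | zero =>
    intro _
    simp only [List.range_zero, List.foldl_nil]
    apply List.ext_getElem (by simp [tableAt])
    intro t h1 h2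
    simp only [tableAt, List.getElem_replicate, List.getElem_map, List.getElem_range]
    split
    case isTrue h => interval_cases t; simp [rowAfter]
    case isFalse h => rfl
  | succ k ih =>
    intro hk
    rw [List.range_succ, List.foldl_append, ih (by omega)]
    simp only [List.foldl_cons, List.foldl_nil]
    have hlen := rowAfter_length cm med bs as k
    rcases hrk : rowAfter cm med bs as k with _ | ⟨p0, rest⟩
    · rw [hrk] at hlen; simp at hlen
    · rw [hrk] at hlen
      have hrest : rest.length = bs.length := by simpa using hlen
      rw [inner_fold cm med (as.getD k "") bs p0 rest hrest bs.length (le_refl _)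
        (tableAt cm med bs as k) k
        (by rw [tableAt_getD cm med bs as k k (by omega)]; simp [hrk])
        (by rw [tableAt_getD cm med bs as k (k + 1) (by omega)]; simp)
        (by rw [tableAt_length]; omega)]
      have hg : (0 :: nextRowGo cm med (as.getD k "") 0 p0 rest bs).length = bs.length + 1 := by
        simp [nextRowGo_length, hrest]
      rw [List.take_of_length_le (by rw [hg]), Nat.sub_self, List.replicate_zero,
        List.append_nil]
      have : (0 :: nextRowGo cm med (as.getD k "") 0 p0 rest bs)
          = rowAfter cm med bs as (k + 1) := by
        simp [rowAfter, hrk, nextRow]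
      rw [this, set_tableAt cm med bs as k (by omega)]

-- ----- the rolling rows are exactly the rows of Lp -----
theorem rowAfter_eq_map (cm : List (String × String)) (med : Int) (bs as : List String) :
    ∀ k, rowAfter cm med bs as k
      = (List.range (bs.length + 1)).map (fun j => Lp as bs cm med k j) := by
  intro k
  induction k with
  | zero =>
    apply List.ext_getElem (by simp [rowAfter])
    intro t h1 h2
    simp [rowAfter, Lp]
  | succ k ih =>
    have step : ∀ j, j ≤ bs.length →
        (rowAfter cm med bs as (k + 1)).getD j 0 = Lp as bs cm med (k + 1) j := by
      intro j
      induction j using Nat.strong_induction_on with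
      | _ j ihj =>
        intro hjle
        simp only [rowAfter]
        rw [ih, List.range_succ_eq_map, List.map_cons, List.map_map]
        set rest := (List.range bs.length).map ((fun j => Lp as bs cm med k j) ∘ Nat.succ)
          with hrestdef
        have hrest : rest = (List.range bs.length).map (fun t => Lp as bs cm med k (t + 1)) := by
          simp [hrestdef, Function.comp]
        have hrestlen : rest.length = bs.length := by simp [hrest]
        simp only [nextRow]
        cases j with
        | zero => simp [Lp]
        | succ t =>
          have htb : t < bs.length := by omega
          rw [List.getD_cons_succ,
            nextRowGo_getD cm med (as.getD k "") rest bs 0 (Lp as bs cm med k 0) t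
              (by omega) htb]
          have hrt : ∀ s, s < bs.length → rest.getD s 0 = Lp as bs cm med k (s + 1) := by
            intro s hs
            rw [hrest, List.getD_eq_getElem _ 0 (by simpa using hs)]
            simp
          rw [Lp]
          by_cases he : tokensEquiv (as.getD k "") (bs.getD t "") cm med
          · rw [if_pos he, if_pos he]
            cases t with
            | zero => simp [Lp]
            | succ s =>
              rw [if_neg (by omega)]
              simp only [Nat.add_sub_cancel]
              rw [hrt s (by omega)]
          · rw [if_neg he, if_neg he, hrt t htb]
            cases t with
            | zero =>
              simp [Lp_zero_right]
            | succ s =>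
              rw [if_neg (by omega)]
              have := ihj (s + 1) (by omega) (by omega)
              simp only [rowAfter] at this
              rw [ih] at this
              rw [List.range_succ_eq_map, List.map_cons, List.map_map] at this
              simp only [nextRow, List.getD_cons_succ] at this
              rw [← hrestdef] at this
              simp only [Nat.add_sub_cancel]
              rw [this]
    apply List.ext_getElem (by rw [rowAfter_length]; simp)
    intro t h1 h2
    have ht : t ≤ bs.length := by
      rw [rowAfter_length] at h1; omega
    have := step t ht
    rw [List.getD_eq_getElem _ 0 h1] at this
    rw [this]
    simp

theorem lcs_length_fuzzy_spec : Claim_equal_lcs_length_fuzzy := by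
  intro sa sb cm med _
  unfold Spec_lcs_length_fuzzy
  by_cases h : sa.isEmpty || sb.isEmpty
  · simp [lcs_length_fuzzy, lcs_length_fuzzy_alt, h]
  · simp only [lcs_length_fuzzy, lcs_length_fuzzy_alt, h, Bool.false_eq_true, if_false]
    have hA : dpGet ((List.range sa.length).foldl (fun dp i =>
        (List.range sb.length).foldl (fun dp j =>
          if tokensEquiv (sa.getD i "") (sb.getD j "") cm med then
            dpSet dp (i + 1) (j + 1) (dpGet dp i j + 1)
          else
            dpSet dp (i + 1) (j + 1) (max (dpGet dp i (j + 1)) (dpGet dp (i + 1) j))) dp)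
        (List.replicate (sa.length + 1) (List.replicate (sb.length + 1) 0)))
        sa.length sb.length = Lp sa sb cm med sa.length sb.length := by
      rw [outer_fold cm med sb sa sa.length (le_refl _)]
      simp only [dpGet]
      rw [tableAt_getD cm med sb sa sa.length sa.length (by omega), if_pos (le_refl _),
        rowAfter_eq_map]
      rw [List.getD_eq_getElem _ 0 (by simp)]
      simp
    have hB : (solveB sa sb cm med sa.length sb.length PySem.Dict.empty).1
        = Lp sa sb cm med sa.length sb.length :=
      (solveB_correct sa sb cm med (sa.length + sb.length) sa.length sb.length
        PySem.Dict.empty (le_refl _)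
        (by intro p v hv; simp [PySem.Dict.get?_empty] at hv)).1
    rw [hA, hB]
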